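-- pv_equiv track=rewrite | github.com/erincayaz/Project-Euler-Solutions | problem035.py | circular_shifts
-- ===== SOURCE A (Python) =====
-- def circular_shifts(number):
--     number_str = str(number)
--     length = len(number_str)
--     shifts = []
--
--     for i in range(length):
--         shifted_str = number_str[-i:] + number_str[:-i]
--         shifts.append(int(shifted_str))
--
--     return shifts
-- ===== SOURCE B (Python) =====
-- def circular_shifts(number):
--     cur = str(number)
--     shifts = []
--     for _ in range(len(cur)):
--         shifts.append(int(cur))
--         cur = cur[-1:] + cur[:-1]
--     return shifts
-- ===== Notes on version B (the rewrite author's own statement) =====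
-- stated objective: alternative
-- what changed: B maintains one rotating string accumulator (each iteration moves the last character to the front of the previous rotation) instead of re-slicing the original string at a loop-dependent negative index, so the loop index disappears from the string computation.
import Mathlib
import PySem

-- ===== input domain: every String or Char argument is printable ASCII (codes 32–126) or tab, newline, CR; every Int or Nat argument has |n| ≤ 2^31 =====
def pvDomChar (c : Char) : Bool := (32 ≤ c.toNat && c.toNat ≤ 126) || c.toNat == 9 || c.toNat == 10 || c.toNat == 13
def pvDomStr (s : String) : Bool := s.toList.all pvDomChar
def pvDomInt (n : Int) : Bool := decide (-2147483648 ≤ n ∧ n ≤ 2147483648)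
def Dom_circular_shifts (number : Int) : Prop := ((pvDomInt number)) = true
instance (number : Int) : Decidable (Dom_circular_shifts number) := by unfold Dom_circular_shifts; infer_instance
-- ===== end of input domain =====

-- B replaces A's loop-indexed re-slicing of the original digit string by a single rotating
-- string accumulator (the last character moves to the front each iteration); same cost, different structure.

-- ===== PORT A =====
-- Literal port of A: str(number); for i in range(length): int(number_str[-i:] + number_str[:-i]).
-- int(...) is PySem.Int.ofChars?: none exactly where Python raises ValueError (negative inputs,
-- excluded by Pre_); the .getD 0 is only the total form forced by the List Int return type.
def circular_shifts (number : Int) : List Int :=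
  let number_str := PySem.Int.toChars number
  let length := PySem.Chars.len number_str
  (PySem.List.pyRange 0 length 1).foldl
    (fun shifts i =>
      let shifted_str :=
        PySem.Chars.slice number_str (some (-i)) none ++ PySem.Chars.slice number_str none (some (-i))
      shifts ++ [(PySem.Int.ofChars? shifted_str).getD 0])
    []

-- ===== PORT B =====
-- Literal port of Source B: cur = str(number); loop len(cur) times: append int(cur); cur = cur[-1:] + cur[:-1].
def circular_shifts_alt (number : Int) : List Int :=
  let start := PySem.Int.toChars number
  ((PySem.List.pyRange 0 (PySem.Chars.len start) 1).foldl
    (fun (st : List Char × List Int) _ =>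
      (PySem.Chars.slice st.1 (some (-1)) none ++ PySem.Chars.slice st.1 none (some (-1)),
       st.2 ++ [(PySem.Int.ofChars? st.1).getD 0]))
    (start, [])).2

-- ===== PRECONDITION & SPEC =====
-- Python A raises ValueError on every negative input (the '-' sign lands inside each rotated
-- string, so int() fails on the first rotation); B raises identically there; Pre_ excludes
-- exactly those inputs and nothing else.
def Pre_circular_shifts (number : Int) : Prop := 0 ≤ number
instance (number : Int) : Decidable (Pre_circular_shifts number) := by unfold Pre_circular_shifts; infer_instance
def pvWitness_circular_shifts : Int := (197)

def Spec_circular_shifts (number : Int) (out : List Int) : Prop := out = circular_shifts_alt number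
instance (number : Int) (out : List Int) : Decidable (Spec_circular_shifts number out) := by unfold Spec_circular_shifts; infer_instance

-- ===== CLAIM (what is proved, stated in full; the proofs are below) =====
def Claim_equal_circular_shifts : Prop := ∀ (number : Int), Dom_circular_shifts number → Pre_circular_shifts number → Spec_circular_shifts number (circular_shifts number)

-- ===== LEMMAS AND PROOFS =====

def pvR (s : List Char) (k : Nat) : List Char :=
  s.drop (s.length - k) ++ s.take (s.length - k)

lemma pvR_len (s : List Char) (k : Nat) : (pvR s k).length = s.length := by
  simp only [pvR, List.length_append, List.length_drop, List.length_take]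
  omega

lemma pvRot_R (s : List Char) (k : Nat) (hk : k < s.length) :
    PySem.Chars.slice (pvR s k) (some (-1)) none ++ PySem.Chars.slice (pvR s k) none (some (-1))
      = pvR s (k + 1) := by
  have hL : (pvR s k).length = s.length := pvR_len s k
  rw [PySem.Chars.slice, PySem.Chars.slice,
      PySem.List.slice_from_neg_one, PySem.List.slice_to_neg_one, hL]
  unfold pvR
  have hlen_drop : (List.drop (s.length - k) s).length = k := by
    simp only [List.length_drop]; omega
  have hlen_take : (List.take (s.length - k) s).length = s.length - k := by
    simp only [List.length_take]; omega
  rw [List.drop_append, List.dropLast_append]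
  have h1 : List.drop (s.length - 1) (List.drop (s.length - k) s) = [] := by
    apply List.drop_eq_nil_of_le; omega
  have h2 : List.drop (s.length - 1 - (List.drop (s.length - k) s).length) (List.take (s.length - k) s)
      = List.take 1 (List.drop (s.length - (k + 1)) s) := by
    rw [hlen_drop, List.drop_take]
    have e1 : s.length - 1 - k = s.length - (k+1) := by omega
    have e2 : s.length - k - (s.length - (k + 1)) = 1 := by omega
    rw [e1, e2]
  have h3 : (List.take (s.length - k) s).isEmpty = false := by
    rw [List.isEmpty_eq_false_iff, ← List.length_pos_iff, hlen_take]; omega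
  rw [h1, h2, h3]
  simp only [List.nil_append, Bool.false_eq_true, if_false]
  have h4 : (List.take (s.length - k) s).dropLast = List.take (s.length - (k + 1)) s := by
    rw [List.dropLast_eq_take, hlen_take, List.take_take]
    congr 1; omega
  rw [h4]
  rw [← List.append_assoc]
  congr 1
  · have h5 := List.take_append_drop 1 (List.drop (s.length - (k+1)) s)
    rw [List.drop_drop] at h5
    have e3 : s.length - k = s.length - (k+1) + 1 := by omega
    rw [e3]
    exact h5

lemma pvA_str (s : List Char) (k : Nat) :
    PySem.Chars.slice s (some (-(k : Int))) none ++ PySem.Chars.slice s none (some (-(k : Int)))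
      = pvR s k := by
  unfold pvR
  rcases Nat.eq_zero_or_pos k with rfl | hk
  · simp [PySem.Chars.slice, PySem.List.slice_none_none, PySem.List.slice_to s (b := 0) (by omega)]
  · simp [PySem.Chars.slice, PySem.List.slice_from_neg_natCast s k hk,
      PySem.List.slice_to_neg_natCast s k hk]


lemma pvB_fold (s : List Char) (l : List Int) (hn : l.length ≤ s.length) :
    List.foldl
      (fun (st : List Char × List Int) (_ : Int) =>
        (PySem.Chars.slice st.1 (some (-1)) none ++ PySem.Chars.slice st.1 none (some (-1)),
         st.2 ++ [(PySem.Int.ofChars? st.1).getD 0]))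
      (s, ([] : List Int)) l
    = (pvR s l.length, (List.range l.length).map (fun k => (PySem.Int.ofChars? (pvR s k)).getD 0)) := by
  induction l using List.reverseRecOn with
  | nil => simp [pvR]
  | append_singleton l' x ih =>
      rw [List.foldl_append, ih (by simp at hn; omega)]
      simp only [List.foldl_cons, List.foldl_nil, List.length_append, List.length_cons,
        List.length_nil, Nat.zero_add]
      rw [pvRot_R s l'.length (by simp at hn; omega)]
      rw [List.range_succ, List.map_append]
      simp

-- ===== VERDICT (by name: the statement is the Claim_ definition above) =====
theorem circular_shifts_spec : Claim_equal_circular_shifts := by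
  intro number _ _
  unfold Spec_circular_shifts circular_shifts circular_shifts_alt
  simp only [PySem.Chars.len, PySem.List.pyRange_zero_natCast]
  rw [pvB_fold _ _ (by simp)]
  rw [List.foldl_map, PySem.List.foldl_append_singleton_eq_map
    (f := fun k : Nat => (PySem.Int.ofChars? (PySem.Chars.slice (PySem.Int.toChars number) (some (-(k:Int))) none ++ PySem.Chars.slice (PySem.Int.toChars number) none (some (-(k:Int))))).getD 0)]
  simp only [List.nil_append, List.length_map, List.length_range]
  apply List.map_congr_left
  intro k _
  rw [pvA_str]
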